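-- pv_equiv track=rewrite | github.com/anthropics/original_performance_takehome | scripts/analyze_kernel.py | analyze_consecutive_patterns
-- ===== SOURCE A (Python) =====
-- def analyze_consecutive_patterns(instrs):
--     """Find consecutive bundles that could potentially be merged."""
--     patterns = {
--         "consecutive_valu_only": 0,
--         "consecutive_load_only": 0,
--         "valu_without_load": 0,  # VALU bundles with no load that follow another
--         "max_valu_only_run": 0,
--     }
--
--     current_valu_run = 0
--     prev_was_valu_only = False
--
--     for instr in instrs:
--         is_valu_only = list(instr.keys()) == ["valu"]
--         is_load_only = list(instr.keys()) == ["load"]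
--         has_valu = "valu" in instr
--         has_load = "load" in instr
--
--         if is_valu_only:
--             current_valu_run += 1
--             patterns["max_valu_only_run"] = max(
--                 patterns["max_valu_only_run"], current_valu_run
--             )
--             if prev_was_valu_only:
--                 patterns["consecutive_valu_only"] += 1
--         else:
--             current_valu_run = 0
--
--         if is_load_only and prev_was_valu_only:
--             patterns["consecutive_load_only"] += 1
--
--         if has_valu and not has_load:
--             patterns["valu_without_load"] += 1
--
--         prev_was_valu_only = is_valu_only
--
--     return patterns
-- ===== SOURCE B (Python) =====
-- def analyze_consecutive_patterns(instrs):
--     """Find consecutive bundles that could potentially be merged."""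
--     valu_only = [list(i.keys()) == ["valu"] for i in instrs]
--     load_only = [list(i.keys()) == ["load"] for i in instrs]
--     valu_no_load = ["valu" in i and "load" not in i for i in instrs]
--     return {
--         "consecutive_valu_only": sum(1 for a, b in zip(valu_only, valu_only[1:]) if a and b),
--         "consecutive_load_only": sum(1 for a, b in zip(valu_only, load_only[1:]) if a and b),
--         "valu_without_load": sum(valu_no_load),
--         "max_valu_only_run": _max_true_run(valu_only),
--     }
--
--
-- def _max_true_run(flags):
--     """Longest block of consecutive True values (0 if none)."""
--     mx = 0
--     i = 0
--     n = len(flags)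
--     while i < n:
--         if flags[i]:
--             j = i
--             while j < n and flags[j]:
--                 j += 1
--             mx = max(mx, j - i)
--             i = j
--         else:
--             i += 1
--     return mx
-- ===== Notes on version B (the rewrite author's own statement) =====
-- stated objective: alternative
-- what changed: Replaces A's single fused loop carrying prev/run state with a multi-pass decomposition: classify every bundle once into three flag lists, count the two consecutive patterns by zipping a flag list with its shift, sum the no-load flags, and compute the longest valu-only run by a separate block-scanning helper.
import Mathlib
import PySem

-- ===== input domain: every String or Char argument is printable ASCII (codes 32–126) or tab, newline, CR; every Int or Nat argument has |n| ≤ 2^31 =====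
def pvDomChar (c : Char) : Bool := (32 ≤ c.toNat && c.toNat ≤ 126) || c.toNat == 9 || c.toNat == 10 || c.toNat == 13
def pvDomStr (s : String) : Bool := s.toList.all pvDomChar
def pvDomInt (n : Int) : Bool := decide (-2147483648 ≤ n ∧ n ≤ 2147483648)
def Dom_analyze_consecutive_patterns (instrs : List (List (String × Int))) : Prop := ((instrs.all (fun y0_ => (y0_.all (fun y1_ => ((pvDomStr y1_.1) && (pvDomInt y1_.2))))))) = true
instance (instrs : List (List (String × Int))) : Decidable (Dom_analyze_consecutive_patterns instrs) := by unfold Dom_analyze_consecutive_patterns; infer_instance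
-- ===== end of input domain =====

-- B replaces A's single fused loop (prev/run state) with a multi-pass decomposition:
-- flag lists, zip-with-shift counts, and a separate longest-true-run scan. Same cost; alternative structure.


-- ===== PORT A =====
-- A's `patterns` dict has the same four keys throughout (created at the top, only
-- overwritten in the loop), so it is carried as four Int fields and emitted in
-- insertion order at the end; the loop is the same fold over the same state.
def pvStepA (s : Int × Int × Int × Int × Int × Bool) (instr : List (String × Int)) :
    Int × Int × Int × Int × Int × Bool :=
  let (cv, cl, vw, mx, run, prev) := s
  let keys := PySem.List.dedup (instr.map Prod.fst)       -- list(instr.keys()) of the dict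
  let is_valu_only := keys == ["valu"]
  let is_load_only := keys == ["load"]
  let has_valu := (instr.map Prod.fst).contains "valu"    -- "valu" in instr
  let has_load := (instr.map Prod.fst).contains "load"
  let run' := if is_valu_only then run + 1 else 0
  let mx' := if is_valu_only then max mx run' else mx
  let cv' := if is_valu_only && prev then cv + 1 else cv
  let cl' := if is_load_only && prev then cl + 1 else cl
  let vw' := if has_valu && !has_load then vw + 1 else vw
  (cv', cl', vw', mx', run', is_valu_only)

def analyze_consecutive_patterns (instrs : List (List (String × Int))) : List (String × Int) :=
  let s := instrs.foldl pvStepA (0, 0, 0, 0, 0, false)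
  match s with
  | (cv, cl, vw, mx, _, _) =>
    [("consecutive_valu_only", cv), ("consecutive_load_only", cl),
     ("valu_without_load", vw), ("max_valu_only_run", mx)]

-- ===== PORT B =====
-- Source B's _max_true_run: the index-based block scan written structurally
-- (the inner `while` is takeWhile, jumping i to j is dropWhile).
def pvMaxTrueRun : List Bool → Int
  | [] => 0
  | false :: bs => pvMaxTrueRun bs
  | true :: bs =>
      max (1 + ((bs.takeWhile id).length : Int)) (pvMaxTrueRun (bs.dropWhile id))
termination_by bs => bs.length
decreasing_by
  · simp
  · simp only [List.length_cons]
    exact Nat.lt_succ_of_le (List.length_dropWhile_le id bs)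

def analyze_consecutive_patterns_alt (instrs : List (List (String × Int))) : List (String × Int) :=
  let vos := instrs.map (fun i => PySem.List.dedup (i.map Prod.fst) == ["valu"])
  let los := instrs.map (fun i => PySem.List.dedup (i.map Prod.fst) == ["load"])
  let vnl := instrs.map (fun i => (i.map Prod.fst).contains "valu" && !(i.map Prod.fst).contains "load")
  [("consecutive_valu_only", ((vos.zip vos.tail).countP (fun p => p.1 && p.2) : Int)),
   ("consecutive_load_only", ((vos.zip los.tail).countP (fun p => p.1 && p.2) : Int)),
   ("valu_without_load", (vnl.countP id : Int)),
   ("max_valu_only_run", pvMaxTrueRun vos)]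

-- ===== PRECONDITION & SPEC =====
def Spec_analyze_consecutive_patterns (instrs : List (List (String × Int))) (out : List (String × Int)) : Prop := out = analyze_consecutive_patterns_alt instrs
instance (instrs : List (List (String × Int))) (out : List (String × Int)) : Decidable (Spec_analyze_consecutive_patterns instrs out) := by unfold Spec_analyze_consecutive_patterns; infer_instance

-- ===== CLAIM (what is proved, stated in full; the proofs are below) =====
def Claim_equal_analyze_consecutive_patterns : Prop := ∀ (instrs : List (List (String × Int))), Dom_analyze_consecutive_patterns instrs → Spec_analyze_consecutive_patterns instrs (analyze_consecutive_patterns instrs)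

-- ===== LEMMAS AND PROOFS =====

-- classification flags of one instruction
def pvVO (i : List (String × Int)) : Bool := PySem.List.dedup (i.map Prod.fst) == ["valu"]
def pvLO (i : List (String × Int)) : Bool := PySem.List.dedup (i.map Prod.fst) == ["load"]
def pvVN (i : List (String × Int)) : Bool := (i.map Prod.fst).contains "valu" && !(i.map Prod.fst).contains "load"

lemma pvMaxTrueRun_nil : pvMaxTrueRun [] = 0 := by rw [pvMaxTrueRun]
lemma pvMaxTrueRun_false (bs : List Bool) : pvMaxTrueRun (false :: bs) = pvMaxTrueRun bs := by
  rw [pvMaxTrueRun]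
lemma pvMaxTrueRun_true (bs : List Bool) :
    pvMaxTrueRun (true :: bs) =
      max (1 + ((bs.takeWhile id).length : Int)) (pvMaxTrueRun (bs.dropWhile id)) := by
  rw [pvMaxTrueRun]

lemma pvMaxTrueRun_nonneg (bs : List Bool) : 0 ≤ pvMaxTrueRun bs := by
  induction bs using pvMaxTrueRun.induct with
  | case1 => rw [pvMaxTrueRun_nil]
  | case2 bs ih => rw [pvMaxTrueRun_false]; exact ih
  | case3 bs ih => rw [pvMaxTrueRun_true]; positivity

-- `pvExt run bs`: the best valu-only run over bs when a run of length `run` is still open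
def pvExt (run : Int) : List Bool → Int
  | [] => 0
  | false :: bs => pvMaxTrueRun bs
  | true :: bs => max (run + 1 + ((bs.takeWhile id).length : Int)) (pvMaxTrueRun (bs.dropWhile id))

def pvFinalRun (run : Int) : List Bool → Int
  | [] => run
  | b :: bs => pvFinalRun (if b then run + 1 else 0) bs

def pvFinalPrev (prev : Bool) : List Bool → Bool
  | [] => prev
  | b :: bs => pvFinalPrev b bs

lemma pvExt_zero (bs : List Bool) : pvExt 0 bs = pvMaxTrueRun bs := by
  cases bs with
  | nil => simp [pvExt, pvMaxTrueRun_nil]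
  | cons b bs => cases b
                 · simp [pvExt, pvMaxTrueRun_false]
                 · simp [pvExt, pvMaxTrueRun_true]

lemma pvExt_true (mx run : Int) (h : 0 ≤ run) (vs : List Bool) :
    max (max mx (run + 1)) (pvExt (run + 1) vs) = max mx (pvExt run (true :: vs)) := by
  cases vs with
  | nil => simp only [pvExt, List.takeWhile_nil, List.dropWhile_nil, pvMaxTrueRun_nil,
             List.length_nil]
           omega
  | cons b vs =>
    cases b
    · simp only [pvExt, List.takeWhile_cons, List.dropWhile_cons, id, if_false,
        Bool.false_eq_true, pvMaxTrueRun_false, List.length_nil]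
      omega
    · simp only [pvExt, List.takeWhile_cons, List.dropWhile_cons, id, if_true,
        List.length_cons]
      push_cast
      omega

lemma pvStepA_eq (cv cl vw mx run : Int) (prev : Bool) (a : List (String × Int)) :
    pvStepA (cv, cl, vw, mx, run, prev) a =
      ((if pvVO a && prev then cv + 1 else cv),
       (if pvLO a && prev then cl + 1 else cl),
       (if pvVN a then vw + 1 else vw),
       (if pvVO a then max mx (if pvVO a then run + 1 else 0) else mx),
       (if pvVO a then run + 1 else 0),
       pvVO a) := rfl

lemma pvMain (l : List (List (String × Int))) :
    ∀ (cv cl vw mx run : Int) (prev : Bool), 0 ≤ run → run ≤ mx →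
    l.foldl pvStepA (cv, cl, vw, mx, run, prev) =
      (cv + (((prev :: l.map pvVO).zip (l.map pvVO)).countP (fun p => p.1 && p.2) : Int),
       cl + (((prev :: l.map pvVO).zip (l.map pvLO)).countP (fun p => p.1 && p.2) : Int),
       vw + ((l.map pvVN).countP id : Int),
       max mx (pvExt run (l.map pvVO)),
       pvFinalRun run (l.map pvVO),
       pvFinalPrev prev (l.map pvVO)) := by
  induction l with
  | nil =>
    intro cv cl vw mx run prev h0 h1
    simp only [List.foldl_nil, List.map_nil, List.zip_nil_right, List.countP_nil, pvExt,
      pvFinalRun, pvFinalPrev, Nat.cast_zero, add_zero]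
    have : max mx 0 = mx := by omega
    rw [this]
  | cons a l ih =>
    intro cv cl vw mx run prev h0 h1
    simp only [List.foldl_cons, pvStepA_eq, List.map_cons]
    cases hvo : pvVO a
    · simp only [Bool.false_and, Bool.false_eq_true, reduceIte]
      rw [ih _ _ _ _ _ _ (le_refl 0) (by omega), pvExt_zero,
        show pvExt run (false :: l.map pvVO) = pvMaxTrueRun (l.map pvVO) from rfl]
      cases prev <;> cases hlo : pvLO a <;> cases hvn : pvVN a <;>
        simp [List.zip_cons_cons, pvFinalRun, pvFinalPrev] <;> omega
    · simp only [Bool.true_and, reduceIte]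
      rw [ih _ _ _ _ _ _ (by omega) (le_max_right mx (run + 1)),
        pvExt_true mx run h0 (l.map pvVO)]
      cases prev <;> cases hlo : pvLO a <;> cases hvn : pvVN a <;>
        simp [List.zip_cons_cons, pvFinalRun, pvFinalPrev] <;> omega

lemma pvShiftV (vos : List Bool) :
    (((false :: vos).zip vos).countP (fun p => p.1 && p.2) : Nat) =
      (vos.zip vos.tail).countP (fun p => p.1 && p.2) := by
  cases vos <;> simp

lemma pvShiftL (vos los : List Bool) (h : vos.length = los.length) :
    (((false :: vos).zip los).countP (fun p => p.1 && p.2) : Nat) =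
      (vos.zip los.tail).countP (fun p => p.1 && p.2) := by
  cases vos with
  | nil => cases los <;> simp_all
  | cons v vs => cases los <;> simp_all

-- ===== VERDICT (by name: the statement is the Claim_ definition above) =====
theorem analyze_consecutive_patterns_spec : Claim_equal_analyze_consecutive_patterns := by
  intro instrs _
  unfold Spec_analyze_consecutive_patterns analyze_consecutive_patterns
    analyze_consecutive_patterns_alt
  have e1 : instrs.map (fun i => PySem.List.dedup (i.map Prod.fst) == ["valu"])
      = instrs.map pvVO := rfl
  have e2 : instrs.map (fun i => PySem.List.dedup (i.map Prod.fst) == ["load"])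
      = instrs.map pvLO := rfl
  have e3 : instrs.map
        (fun i => (i.map Prod.fst).contains "valu" && !(i.map Prod.fst).contains "load")
      = instrs.map pvVN := rfl
  simp only [e1, e2, e3]
  rw [pvMain instrs 0 0 0 0 0 false (le_refl 0) (le_refl 0)]
  simp only [zero_add, pvExt_zero]
  rw [max_eq_right (pvMaxTrueRun_nonneg _), pvShiftV, pvShiftL _ _ (by simp)]
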